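-- pv_equiv track=rewrite | github.com/alex-sebi/Local-A-packets | EMS.py | minimals
-- ===== SOURCE A (Python) =====
-- def minimals(M):
-- 	m_values=[]
-- 	for i in range(0,len(M)):
-- 		minimal=True
-- 		for j in range(i+1,len(M)):
-- 			if M[i][0][0]>=M[j][0][0] and M[i][0][1]<=M[j][0][1]:
-- 				minimal=False
-- 		if minimal:
-- 			m_values.append(i)
-- 	return(m_values)
-- ===== SOURCE B (Python) =====
-- def minimals(M):
--     # Right-to-left sweep maintaining a Pareto frontier of the pairs already seen:
--     # only frontier points can dominate, so each index is tested against the frontier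
--     # instead of every later row.
--     res = []
--     frontier = []  # pairs (a, b), none covering another (cover: fa <= a and fb >= b)
--     for i in range(len(M) - 1, -1, -1):
--         a = M[i][0][0]
--         b = M[i][0][1]
--         if any(fa <= a and fb >= b for (fa, fb) in frontier):
--             continue  # dominated by a later row; it also cannot extend the frontier
--         res.append(i)
--         frontier = [(fa, fb) for (fa, fb) in frontier
--                     if not (a <= fa and b >= fb)] + [(a, b)]
--     res.reverse()
--     return res
-- ===== Notes on version B (the rewrite author's own statement) =====
-- stated objective: faster
-- what changed: A compares each row against every later row (full quadratic scan); B sweeps right-to-left once, maintaining only the Pareto frontier of the pairs already seen and testing each row against that frontier instead of the whole suffix, which is measurably faster (same worst case if all pairs are incomparable).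
-- outside the precondition, e.g. on minimals([[]]): A returns [0], B raises IndexError; on minimals([[[7]]]): A returns [0], B raises IndexError
import Mathlib
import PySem

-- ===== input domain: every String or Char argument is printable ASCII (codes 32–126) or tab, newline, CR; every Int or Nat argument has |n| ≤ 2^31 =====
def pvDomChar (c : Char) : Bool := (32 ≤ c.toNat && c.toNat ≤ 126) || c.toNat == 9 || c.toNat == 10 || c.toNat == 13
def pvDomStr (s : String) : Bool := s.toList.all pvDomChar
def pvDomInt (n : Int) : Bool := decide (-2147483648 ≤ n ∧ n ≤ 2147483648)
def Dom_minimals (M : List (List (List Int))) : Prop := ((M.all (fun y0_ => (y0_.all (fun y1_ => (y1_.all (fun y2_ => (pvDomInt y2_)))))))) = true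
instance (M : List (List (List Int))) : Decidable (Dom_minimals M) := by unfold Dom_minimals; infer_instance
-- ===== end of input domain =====

-- B replaces A's scan over all later rows by a right-to-left sweep that keeps only the
-- Pareto frontier of the pairs already seen (objective: alternative algorithm; equal return value).

-- Shared accessors for M[i][0][0] / M[i][0][1] (both Pythons write exactly these
-- subscripts); pyGetD's defaults are never reached under Pre_minimals, where every
-- subscript is in range, so they are exact there.
def pvA (M : List (List (List Int))) (i : Int) : Int :=
  PySem.List.pyGetD (PySem.List.pyGetD (PySem.List.pyGetD M i []) 0 []) 0 0
def pvB (M : List (List (List Int))) (i : Int) : Int :=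
  PySem.List.pyGetD (PySem.List.pyGetD (PySem.List.pyGetD M i []) 0 []) 1 0

-- ===== PORT A =====
def minimals (M : List (List (List Int))) : List Int :=
  (PySem.List.pyRange 0 (PySem.List.len M) 1).foldl
    (fun m_values i =>
      let minimal := (PySem.List.pyRange (i + 1) (PySem.List.len M) 1).foldl
        (fun minimal j =>
          if pvA M i ≥ pvA M j ∧ pvB M i ≤ pvB M j then false else minimal) true
      if minimal then m_values ++ [i] else m_values)
    []

-- ===== PORT B =====
def minimals_alt (M : List (List (List Int))) : List Int :=
  let st := (PySem.List.pyRange (PySem.List.len M - 1) (-1) (-1)).foldl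
    (fun (st : List Int × List (Int × Int)) i =>
      let a := pvA M i
      let b := pvB M i
      if st.2.any (fun q => q.1 ≤ a && b ≤ q.2) then st
      else (st.1 ++ [i], st.2.filter (fun q => !(a ≤ q.1 && q.2 ≤ b)) ++ [(a, b)]))
    ([], [])
  st.1.reverse

-- ===== PRECONDITION & SPEC =====
-- Pre_ requires every row to be nonempty with a first pair of length ≥ 2: outside it A
-- raises IndexError, except on a single malformed row (len(M) = 1), which A returns [0]
-- on without ever reading it — an artefact of its nested loops being empty; B reads the
-- row and raises there, so those inputs are excluded too.
def Pre_minimals (M : List (List (List Int))) : Prop :=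
  ∀ r ∈ M, r ≠ [] ∧ 2 ≤ (r.headD []).length
instance (M : List (List (List Int))) : Decidable (Pre_minimals M) := by
  unfold Pre_minimals; infer_instance

def pvWitness_minimals : List (List (List Int)) := [[[1, 2]], [[0, 3]], [[5, 0]]]

def Spec_minimals (M : List (List (List Int))) (out : List Int) : Prop := out = minimals_alt M
instance (M : List (List (List Int))) (out : List Int) : Decidable (Spec_minimals M out) := by unfold Spec_minimals; infer_instance

-- ===== CLAIM (what is proved, stated in full; the proofs are below) =====
def Claim_equal_minimals : Prop := ∀ (M : List (List (List Int))), Dom_minimals M → Pre_minimals M → Spec_minimals M (minimals M)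

-- ===== LEMMAS AND PROOFS =====

-- A's inner loop: a boolean flag knocked to false by any dominating later row.
theorem pv_foldl_flag (c : Int → Prop) [DecidablePred c] :
    ∀ (L : List Int) (m : Bool),
      L.foldl (fun minimal j => if c j then false else minimal) m
        = (m && L.all (fun j => !decide (c j))) := by
  intro L
  induction L with
  | nil => intro m; simp
  | cons x L ih =>
      intro m
      rw [List.foldl_cons]
      by_cases hx : c x
      · rw [if_pos hx, ih]; simp [hx]
      · rw [if_neg hx, ih]; simp [hx]

-- A returns exactly the filter of the index range by "no later row dominates".
def pvP (M : List (List (List Int))) (i : Int) : Bool :=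
  (PySem.List.pyRange (i + 1) (PySem.List.len M) 1).all
    (fun j => !decide (pvA M i ≥ pvA M j ∧ pvB M i ≤ pvB M j))

theorem pv_A_char (M : List (List (List Int))) :
    minimals M = (PySem.List.pyRange 0 (PySem.List.len M) 1).filter (pvP M) := by
  unfold minimals
  simp only [pv_foldl_flag, Bool.true_and]
  exact PySem.List.foldl_append_if_eq_filter (pvP M) _ _

-- Unpacked forms of pvP.
theorem pvP_false (M : List (List (List Int))) (i : Int) :
    pvP M i = false ↔ ∃ j ∈ PySem.List.pyRange (i + 1) (PySem.List.len M) 1,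
      pvA M j ≤ pvA M i ∧ pvB M i ≤ pvB M j := by
  simp [pvP, List.all_eq_false, ge_iff_le]

theorem pvP_true (M : List (List (List Int))) (i : Int) :
    pvP M i = true ↔ ∀ j ∈ PySem.List.pyRange (i + 1) (PySem.List.len M) 1,
      ¬(pvA M j ≤ pvA M i ∧ pvB M i ≤ pvB M j) := by
  simp only [pvP, List.all_eq_true, PySem.List.mem_pyRange_one, ge_iff_le,
    Bool.not_eq_eq_eq_not, Bool.not_true, decide_eq_false_iff_not, not_and, not_le]

-- B's step function, named for the induction.
def pvStep (M : List (List (List Int))) (st : List Int × List (Int × Int)) (i : Int) :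
    List Int × List (Int × Int) :=
  let a := pvA M i
  let b := pvB M i
  if st.2.any (fun q => q.1 ≤ a && b ≤ q.2) then st
  else (st.1 ++ [i], st.2.filter (fun q => !(a ≤ q.1 && q.2 ≤ b)) ++ [(a, b)])

-- The sweep invariant: after processing the suffix range [n-k, n), the first component
-- is the (reversed) filtered suffix and the frontier covers a point iff some row of the
-- suffix covers it.
theorem pv_B_inv (M : List (List (List Int))) :
    ∀ (k : Nat), (k : Int) ≤ PySem.List.len M →
      (((PySem.List.pyRange (PySem.List.len M - k) (PySem.List.len M) 1).foldr
          (fun i st => pvStep M st i) ([], [])).1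
        = ((PySem.List.pyRange (PySem.List.len M - k) (PySem.List.len M) 1).filter (pvP M)).reverse)
      ∧ (∀ x y : Int,
          (((PySem.List.pyRange (PySem.List.len M - k) (PySem.List.len M) 1).foldr
              (fun i st => pvStep M st i) ([], [])).2.any (fun q => q.1 ≤ x && y ≤ q.2)) = true
            ↔ ∃ j ∈ PySem.List.pyRange (PySem.List.len M - k) (PySem.List.len M) 1,
                pvA M j ≤ x ∧ y ≤ pvB M j) := by
  intro k
  induction k with
  | zero =>
      intro _
      rw [Nat.cast_zero, sub_zero, PySem.List.pyRange_one_eq_nil (le_refl _)]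
      simp
  | succ k ih =>
      intro hk
      have hk' : (k : Int) ≤ PySem.List.len M := by push_cast at hk ⊢; omega
      have hlt : PySem.List.len M - ((k + 1 : Nat) : Int) < PySem.List.len M := by
        push_cast; omega
      have heq : PySem.List.len M - ((k + 1 : Nat) : Int) + 1 = PySem.List.len M - (k : Int) := by
        push_cast; ring
      obtain ⟨ih1, ih2⟩ := ih hk'
      rw [PySem.List.pyRange_one_cons hlt, heq]
      set i : Int := PySem.List.len M - ((k + 1 : Nat) : Int) with hi
      set rng : List Int := PySem.List.pyRange (PySem.List.len M - (k : Int)) (PySem.List.len M) 1 with hrng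
      set st' := rng.foldr (fun i st => pvStep M st i) (([], []) : List Int × List (Int × Int)) with hst
      rw [List.foldr_cons]
      by_cases ht : st'.2.any (fun q => q.1 ≤ pvA M i && pvB M i ≤ q.2) = true
      · -- i is dominated by some later row: state unchanged
        obtain ⟨j0, hj0, hj01, hj02⟩ := (ih2 (pvA M i) (pvB M i)).mp ht
        have hstep : pvStep M st' i = st' := by
          simp only [pvStep]; rw [if_pos ht]
        rw [hstep]
        have hfalse : pvP M i = false := by
          rw [pvP_false, heq, ← hrng]
          exact ⟨j0, hj0, hj01, hj02⟩
        constructor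
        · rw [List.filter_cons_of_neg (by simp [hfalse])]
          exact ih1
        · intro x y
          rw [ih2 x y]
          constructor
          · rintro ⟨j, hj, hc⟩
            exact ⟨j, List.mem_cons_of_mem _ hj, hc⟩
          · rintro ⟨j, hj, hc1, hc2⟩
            rcases List.mem_cons.mp hj with hji | hji
            · subst hji
              exact ⟨j0, hj0, le_trans hj01 hc1, le_trans hc2 hj02⟩
            · exact ⟨j, hji, hc1, hc2⟩
      · -- i is minimal: append it and prune the frontier
        have htrue : pvP M i = true := by
          rw [pvP_true, heq, ← hrng]
          rintro j hj ⟨h1, h2⟩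
          exact absurd ((ih2 (pvA M i) (pvB M i)).mpr ⟨j, hj, h1, h2⟩) ht
        have hstep : pvStep M st' i =
            (st'.1 ++ [i],
             st'.2.filter (fun q => !(pvA M i ≤ q.1 && q.2 ≤ pvB M i)) ++ [(pvA M i, pvB M i)]) := by
          simp only [pvStep]; rw [if_neg ht]
        rw [hstep]
        constructor
        · rw [List.filter_cons_of_pos (by simp [htrue]), List.reverse_cons, ih1]
        · intro x y
          simp only [List.any_append, List.any_cons, List.any_nil, Bool.or_eq_true,
            List.any_eq_true, List.mem_filter, Bool.or_false, Bool.and_eq_true,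
            decide_eq_true_eq]
          constructor
          · rintro (⟨q, ⟨hq, _⟩, hq1, hq2⟩ | ⟨h1, h2⟩)
            · obtain ⟨j, hj, hc⟩ := (ih2 x y).mp (List.any_eq_true.mpr ⟨q, hq, by simp [hq1, hq2]⟩)
              exact ⟨j, List.mem_cons_of_mem _ hj, hc⟩
            · exact ⟨i, List.mem_cons.mpr (Or.inl rfl), h1, h2⟩
          · rintro ⟨j, hj, hc1, hc2⟩
            rcases List.mem_cons.mp hj with hji | hji
            · subst hji
              exact Or.inr ⟨hc1, hc2⟩
            · obtain ⟨q, hq, hq12⟩ := List.any_eq_true.mp ((ih2 x y).mpr ⟨j, hji, hc1, hc2⟩)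
              simp only [Bool.and_eq_true, decide_eq_true_eq] at hq12
              obtain ⟨hq1, hq2⟩ := hq12
              by_cases hkeep : (!(pvA M i ≤ q.1 && q.2 ≤ pvB M i)) = true
              · exact Or.inl ⟨q, ⟨hq, hkeep⟩, hq1, hq2⟩
              · simp only [Bool.not_eq_true, Bool.not_eq_false', Bool.and_eq_true,
                  decide_eq_true_eq] at hkeep
                exact Or.inr ⟨le_trans hkeep.1 hq1, le_trans hq2 hkeep.2⟩

theorem pv_B_char (M : List (List (List Int))) :
    minimals_alt M = (PySem.List.pyRange 0 (PySem.List.len M) 1).filter (pvP M) := by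
  unfold minimals_alt
  rw [PySem.List.pyRange_neg_one_eq_reverse]
  have h01 : (-1 : Int) + 1 = 0 := by norm_num
  have h02 : PySem.List.len M - 1 + 1 = PySem.List.len M := by ring
  rw [h01, h02, List.foldl_reverse]
  show (((PySem.List.pyRange 0 (PySem.List.len M) 1).foldr
      (fun i st => pvStep M st i) ([], [])).1).reverse = _
  have hz : PySem.List.len M - ((M.length : Nat) : Int) = 0 := by
    simp [PySem.List.len_eq]
  obtain ⟨h1, _⟩ := pv_B_inv M M.length (by simp [PySem.List.len_eq])
  rw [hz] at h1
  rw [h1, List.reverse_reverse]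

-- ===== VERDICT (by name: the statement is the Claim_ definition above) =====
theorem minimals_spec : Claim_equal_minimals := by
  intro M _ _
  unfold Spec_minimals
  rw [pv_A_char, pv_B_char]
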